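-- pv_equiv track=rewrite | github.com/tavares2401ryan-lab/TrabalhosPSI | Gerados de senhas.py | gerar_sigla
-- ===== SOURCE A (Python) =====
-- def gerar_sigla(frase):
--     sigla = ""
--     nova_palavra = True
--
--     for letra in frase:
--         if nova_palavra == True and letra.isalpha():
--             sigla = sigla + letra.upper()
--             nova_palavra = False
--
--         if letra == " ":
--             nova_palavra = True
--
--     return sigla
-- ===== SOURCE B (Python) =====
-- def gerar_sigla(frase):
--     return "".join(
--         next((c for c in word if c.isalpha()), "").upper()
--         for word in frase.split(" ")
--     )
-- ===== Notes on version B (the rewrite author's own statement) =====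
-- stated objective: idiomatic
-- what changed: Replaces the flat state-machine pass with the nova_palavra flag by splitting the phrase on the space character and emitting the uppercased first alphabetic character of each word, joined into one string.
import Mathlib
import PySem

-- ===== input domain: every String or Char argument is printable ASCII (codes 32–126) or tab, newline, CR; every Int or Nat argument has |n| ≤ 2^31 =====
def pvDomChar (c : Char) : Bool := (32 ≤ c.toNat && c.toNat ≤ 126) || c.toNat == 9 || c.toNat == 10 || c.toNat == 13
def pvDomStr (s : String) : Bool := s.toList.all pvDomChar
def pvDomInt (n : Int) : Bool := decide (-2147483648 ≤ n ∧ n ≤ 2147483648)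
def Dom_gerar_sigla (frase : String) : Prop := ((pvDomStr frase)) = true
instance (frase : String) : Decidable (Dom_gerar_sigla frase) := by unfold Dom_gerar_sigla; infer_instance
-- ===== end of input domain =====

-- B replaces A's flat state-machine pass with the idiomatic split-on-space + first-letter-per-word decomposition.

-- ===== PORT A =====
-- loop body: state (sigla, nova_palavra), the two in-order ifs
def gstep (st : List Char × Bool) (letra : Char) : List Char × Bool :=
  let st1 := if st.2 && PySem.Chars.isalpha letra
             then (st.1 ++ [PySem.Chars.upperChar letra], false) else st
  if letra == ' ' then (st1.1, true) else st1

def gerar_sigla (frase : String) : String :=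
  String.ofList (frase.toList.foldl gstep ([], true)).1

-- ===== PORT B =====
-- next((c for c in word if c.isalpha()), "")
def firstAlpha : List Char → List Char
  | [] => []
  | c :: cs => if PySem.Chars.isalpha c then [c] else firstAlpha cs

def gerar_sigla_alt (frase : String) : String :=
  String.ofList (PySem.Chars.join []
    ((PySem.Chars.splitOn frase.toList [' ']).map
      (fun w => PySem.Chars.upper (firstAlpha w))))

-- ===== PRECONDITION & SPEC =====
def Spec_gerar_sigla (frase : String) (out : String) : Prop := out = gerar_sigla_alt frase
instance (frase : String) (out : String) : Decidable (Spec_gerar_sigla frase out) := by unfold Spec_gerar_sigla; infer_instance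

-- ===== CLAIM (what is proved, stated in full; the proofs are below) =====
def Claim_equal_gerar_sigla : Prop := ∀ (frase : String), Dom_gerar_sigla frase → Spec_gerar_sigla frase (gerar_sigla frase)

-- ===== LEMMAS AND PROOFS =====

-- A's loop, as a recursion on the character list
def gloop : List Char → Bool → List Char
  | [], _ => []
  | c :: cs, nova =>
    if nova && PySem.Chars.isalpha c then
      PySem.Chars.upperChar c :: gloop cs false
    else
      gloop cs (if c == ' ' then true else nova)

theorem isalpha_space : PySem.Chars.isalpha ' ' = false := by decide

theorem gstep_emit (acc : List Char) (c : Char) (h : PySem.Chars.isalpha c = true) :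
    gstep (acc, true) c = (acc ++ [PySem.Chars.upperChar c], false) := by
  have hs : (c == ' ') = false := by
    rcases eq_or_ne c ' ' with rfl | hne
    · exact absurd h (by decide)
    · simp [hne]
  simp [gstep, h, hs]

theorem gstep_skip (acc : List Char) (nova : Bool) (c : Char)
    (h : (nova && PySem.Chars.isalpha c) = false) :
    gstep (acc, nova) c = (acc, if c == ' ' then true else nova) := by
  by_cases hs : (c == ' ') = true <;> simp [gstep, h, hs]

theorem foldl_eq_gloop (cs : List Char) (acc : List Char) (nova : Bool) :
    (cs.foldl gstep (acc, nova)).1 = acc ++ gloop cs nova := by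
  induction cs generalizing acc nova with
  | nil => simp [gloop]
  | cons c cs ih =>
    rw [List.foldl_cons]
    by_cases ha : (nova && PySem.Chars.isalpha c) = true
    · have hA : PySem.Chars.isalpha c = true := by cases nova <;> simp_all
      have hN : nova = true := by cases nova <;> simp_all
      subst hN
      rw [gstep_emit acc c hA, ih, gloop]
      simp [ha]
    · rw [gstep_skip acc nova c (by simpa using ha), ih, gloop]
      simp [ha]

theorem splitOn_go_spec (fuel : ℕ) (l cur : List Char) (accs : List (List Char))
    (h : l.length ≤ fuel) :
    PySem.Chars.splitOn.go [' '] fuel l cur accs =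
      accs.reverse ++ (List.splitOnP (· == ' ') l).modifyHead (cur.reverse ++ ·) := by
  induction fuel generalizing l cur accs with
  | zero =>
    have : l = [] := by simpa using h
    subst this
    simp [PySem.Chars.splitOn.go]
  | succ fuel ih =>
    cases l with
    | nil => simp [PySem.Chars.splitOn.go]
    | cons c rest =>
      have hlen : rest.length ≤ fuel := by simpa using h
      by_cases hc : c = ' '
      · subst hc
        have hpre : List.isPrefixOf [' '] (' ' :: rest) = true := by
          simp [List.isPrefixOf]
        rw [show PySem.Chars.splitOn.go [' '] (fuel+1) (' ' :: rest) cur accs =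
              PySem.Chars.splitOn.go [' '] fuel rest [] (cur.reverse :: accs) by
              simp [PySem.Chars.splitOn.go, hpre]]
        rw [ih rest [] (cur.reverse :: accs) hlen]
        obtain ⟨w, ws, hw⟩ :=
          List.exists_cons_of_ne_nil (List.splitOnP_ne_nil (· == ' ') rest)
        simp [List.splitOnP_cons, hw]
      · have hpre : List.isPrefixOf [' '] (c :: rest) = false := by
          simp [List.isPrefixOf]; exact fun e => hc e.symm
        rw [show PySem.Chars.splitOn.go [' '] (fuel+1) (c :: rest) cur accs =
              PySem.Chars.splitOn.go [' '] fuel rest (c :: cur) accs by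
              simp [PySem.Chars.splitOn.go, hpre]]
        rw [ih rest (c :: cur) accs hlen]
        obtain ⟨w, ws, hw⟩ :=
          List.exists_cons_of_ne_nil (List.splitOnP_ne_nil (· == ' ') rest)
        simp [List.splitOnP_cons, hc, hw]

theorem pysplit_eq_splitOnP (cs : List Char) :
    PySem.Chars.splitOn cs [' '] = List.splitOnP (· == ' ') cs := by
  rw [show PySem.Chars.splitOn cs [' '] =
        PySem.Chars.splitOn.go [' '] (cs.length + 1) cs [] [] from rfl]
  rw [splitOn_go_spec _ _ _ _ (by omega)]
  obtain ⟨w, ws, hw⟩ :=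
    List.exists_cons_of_ne_nil (List.splitOnP_ne_nil (· == ' ') cs)
  simp [hw]

theorem join_nil_cons (w : List Char) (ws : List (List Char)) :
    PySem.Chars.join [] (w :: ws) = w ++ PySem.Chars.join [] ws := by
  cases ws <;> simp [PySem.Chars.join, List.intercalate]

theorem gloop_eq_words (cs : List Char) (nova : Bool) (w : List Char) (ws : List (List Char))
    (h : List.splitOnP (· == ' ') cs = w :: ws) :
    gloop cs nova =
      (if nova then PySem.Chars.upper (firstAlpha w) else []) ++
        PySem.Chars.join [] (ws.map (fun v => PySem.Chars.upper (firstAlpha v))) := by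
  induction cs generalizing nova w ws with
  | nil =>
    rw [List.splitOnP_nil] at h
    obtain ⟨rfl, rfl⟩ : w = [] ∧ ws = [] := by
      simpa [List.cons.injEq] using h.symm
    cases nova <;> simp [gloop, firstAlpha, PySem.Chars.upper, PySem.Chars.join, List.intercalate]
  | cons c cs ih =>
    obtain ⟨w', ws', hw'⟩ :=
      List.exists_cons_of_ne_nil (List.splitOnP_ne_nil (· == ' ') cs)
    by_cases hc : c = ' '
    · subst hc
      rw [List.splitOnP_cons, if_pos (by simp), hw'] at h
      injection h with h1 h2
      have hrec := ih true w' ws' hw'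
      rw [← h1, ← h2, List.map_cons, join_nil_cons]
      simp [gloop, isalpha_space, firstAlpha, PySem.Chars.upper, hrec]
    · rw [List.splitOnP_cons, if_neg (by simp [hc]), hw'] at h
      injection h with h1 h2
      rw [← h1, ← h2]
      by_cases ha : (nova && PySem.Chars.isalpha c) = true
      · have hA : PySem.Chars.isalpha c = true := by cases nova <;> simp_all
        have hN : nova = true := by cases nova <;> simp_all
        subst hN
        rw [gloop, if_pos ha, ih false w' ws' hw']
        simp [firstAlpha, hA, PySem.Chars.upper]
      · have hbe : (c == ' ') = false := by simp [hc]
        rw [gloop, if_neg (by simp_all), hbe]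
        cases nova with
        | false =>
          simpa using ih false w' ws' hw'
        | true =>
          have hA : PySem.Chars.isalpha c = false := by simp_all
          simpa [firstAlpha, hA] using ih true w' ws' hw'

-- ===== VERDICT (by name: the statement is the Claim_ definition above) =====
theorem gerar_sigla_spec : Claim_equal_gerar_sigla := by
  intro frase _
  unfold Spec_gerar_sigla gerar_sigla gerar_sigla_alt
  rw [pysplit_eq_splitOnP, foldl_eq_gloop]
  obtain ⟨w, ws, hw⟩ :=
    List.exists_cons_of_ne_nil (List.splitOnP_ne_nil (· == ' ') frase.toList)
  rw [gloop_eq_words frase.toList true w ws hw, hw]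
  simp [join_nil_cons]
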